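-- pv_equiv track=rewrite | github.com/kkkkkk0725/swebench-reliability-study | src/interfaces.py | resolve_rate
-- ===== SOURCE A (Python) =====
-- def resolve_rate(test_results: dict[str, bool], required_tests: set[str] | None = None) -> bool:
--     """A task is 'resolved' iff all required tests pass.
--
--     If required_tests is None, use all tests in test_results.
--     Missing tests (in required but not in results) count as failures.
--     """
--     if required_tests is None:
--         required_tests = set(test_results.keys())
--     if not required_tests:
--         return False
--     for t in required_tests:
--         if not test_results.get(t, False):
--             return False
--     return True
-- ===== SOURCE B (Python) =====
-- def resolve_rate(test_results: dict[str, bool], required_tests: set[str] | None = None) -> bool: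
--     remaining = set(test_results) if required_tests is None else set(required_tests)
--     if not remaining:
--         return False
--     for t, passed in test_results.items():
--         if passed:
--             remaining.discard(t)
--     return not remaining
-- ===== Notes on version B (the rewrite author's own statement) =====
-- stated objective: alternative
-- what changed: B inverts the traversal: instead of probing the dict once per required test, it makes a single pass over test_results, discarding each passing test from a shrinking 'remaining' set of required tests, and answers by whether that set was exhausted.
import Mathlib
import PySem

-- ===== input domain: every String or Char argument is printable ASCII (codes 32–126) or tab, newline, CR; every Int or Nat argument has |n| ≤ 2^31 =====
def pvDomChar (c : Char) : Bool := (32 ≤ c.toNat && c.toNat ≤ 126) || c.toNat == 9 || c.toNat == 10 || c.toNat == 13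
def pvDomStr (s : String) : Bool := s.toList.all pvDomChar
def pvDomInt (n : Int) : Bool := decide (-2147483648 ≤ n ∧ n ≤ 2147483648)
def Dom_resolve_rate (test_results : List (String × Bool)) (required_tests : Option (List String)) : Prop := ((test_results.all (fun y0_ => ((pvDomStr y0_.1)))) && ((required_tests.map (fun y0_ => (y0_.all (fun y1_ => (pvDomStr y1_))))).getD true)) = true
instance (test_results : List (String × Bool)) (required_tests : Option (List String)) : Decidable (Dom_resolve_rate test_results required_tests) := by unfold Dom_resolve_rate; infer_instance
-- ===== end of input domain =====

-- B inverts the traversal: one pass over test_results that discards each passing test from a shrinking set of required tests, answering by whether the set was exhausted (alternative algorithm, same cost).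


-- ===== PORT A =====
-- 'for t in required_tests: if not test_results.get(t, False): return False' then 'return True'
def pvLoopA (test_results : List (String × Bool)) : List String → Bool
  | [] => true
  | t :: rest =>
      if !((PySem.Dict.mk test_results).getD t false) then false
      else pvLoopA test_results rest

def resolve_rate (test_results : List (String × Bool)) (required_tests : Option (List String)) : Bool :=
  let required : List String :=
    match required_tests with
    | none => PySem.Set.ofList ((PySem.Dict.mk test_results).keys)
    | some s => s
  if required.isEmpty then false
  else pvLoopA test_results required

-- ===== PORT B =====
-- 'for t, passed in test_results.items(): if passed: remaining.discard(t)' then 'return not remaining'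
def resolve_rate_alt (test_results : List (String × Bool)) (required_tests : Option (List String)) : Bool :=
  let remaining : PySem.Set String :=
    match required_tests with
    | none => PySem.Set.ofList (test_results.map Prod.fst)
    | some s => PySem.Set.ofList s
  if remaining.isEmpty then false
  else
    let final : PySem.Set String :=
      test_results.foldl (fun acc p => if p.2 then PySem.Set.discard acc p.1 else acc) remaining
    final.isEmpty

-- ===== PRECONDITION & SPEC =====
-- Pre_ excludes association lists whose keys repeat: a Python dict cannot hold duplicate keys,
-- so such lists represent no input of A.
def Pre_resolve_rate (test_results : List (String × Bool)) (required_tests : Option (List String)) : Prop :=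
  (test_results.map Prod.fst).Nodup
instance (test_results : List (String × Bool)) (required_tests : Option (List String)) : Decidable (Pre_resolve_rate test_results required_tests) := by unfold Pre_resolve_rate; infer_instance
def pvWitness_resolve_rate : (List (String × Bool)) × Option (List String) :=
  ([("a", true), ("b", false)], some ["a"])

def Spec_resolve_rate (test_results : List (String × Bool)) (required_tests : Option (List String)) (out : Bool) : Prop := out = resolve_rate_alt test_results required_tests
instance (test_results : List (String × Bool)) (required_tests : Option (List String)) (out : Bool) : Decidable (Spec_resolve_rate test_results required_tests out) := by unfold Spec_resolve_rate; infer_instance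

-- ===== CLAIM (what is proved, stated in full; the proofs are below) =====
def Claim_equal_resolve_rate : Prop := ∀ (test_results : List (String × Bool)) (required_tests : Option (List String)), Dom_resolve_rate test_results required_tests → Pre_resolve_rate test_results required_tests → Spec_resolve_rate test_results required_tests (resolve_rate test_results required_tests)

-- ===== LEMMAS AND PROOFS =====

-- A's loop is the conjunction of its per-test probes.
theorem pvLoopA_eq_all (tr : List (String × Bool)) (l : List String) :
    pvLoopA tr l = l.all (fun t => (PySem.Dict.mk tr).getD t false) := by
  induction l with
  | nil => rfl
  | cons t rest ih =>
      simp only [pvLoopA, ih, List.all_cons]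
      cases (PySem.Dict.mk tr).getD t false <;> simp

-- Under unique keys, a successful dict probe is membership in the passing-key list.
theorem getD_iff_mem_passing (tr : List (String × Bool)) (t : String)
    (h : (tr.map Prod.fst).Nodup) :
    (PySem.Dict.mk tr).getD t false = true ↔ t ∈ (tr.filter (fun p => p.2)).map Prod.fst := by
  induction tr with
  | nil => simp [PySem.Dict.getD, PySem.Dict.get?]
  | cons p rest ih =>
      obtain ⟨k, v⟩ := p
      simp only [List.map_cons, List.nodup_cons] at h
      rw [PySem.Dict.getD_eq_get?_getD, PySem.Dict.get?_mk_cons]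
      by_cases hk : k = t
      · subst hk
        cases v with
        | true => simp
        | false =>
            have hnot : k ∉ (rest.filter (fun p => p.2)).map Prod.fst := by
              intro hmem
              exact h.1 (by
                rcases List.mem_map.1 hmem with ⟨q, hq, hq1⟩
                exact List.mem_map.2 ⟨q, List.mem_of_mem_filter hq, hq1⟩)
            simp [hnot]
      · have hbeq : (k == t) = false := beq_eq_false_iff_ne.2 hk
        rw [hbeq]
        simp only [Bool.false_eq_true, if_false, ← PySem.Dict.getD_eq_get?_getD]
        rw [ih h.2]
        cases v <;> simp [Ne.symm hk]

-- membership in B's fold: a test survives iff it was remaining and never passed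
theorem mem_foldl_discard (tr : List (String × Bool)) (s : PySem.Set String) (t : String) :
    t ∈ tr.foldl (fun acc p => if p.2 then PySem.Set.discard acc p.1 else acc) s ↔
      t ∈ (s : List String) ∧ t ∉ (tr.filter (fun p => p.2)).map Prod.fst := by
  induction tr generalizing s with
  | nil => simp
  | cons p rest ih =>
      obtain ⟨k, v⟩ := p
      cases v with
      | false => simp [List.foldl_cons, ih]
      | true =>
          simp only [List.foldl_cons, if_true, ih, PySem.Set.mem_discard, List.filter_cons]
          simp only [List.map_cons, List.mem_cons]
          tauto

-- B's final emptiness test is "every remaining test passed"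
theorem foldl_discard_isEmpty (tr : List (String × Bool)) (s : PySem.Set String) :
    (tr.foldl (fun acc p => if p.2 then PySem.Set.discard acc p.1 else acc) s : List String).isEmpty =
      (s : List String).all (fun t => decide (t ∈ (tr.filter (fun p => p.2)).map Prod.fst)) := by
  rw [Bool.eq_iff_iff, List.isEmpty_iff, List.eq_nil_iff_forall_not_mem, List.all_eq_true]
  constructor
  · intro h t ht
    by_contra hn
    exact h t ((mem_foldl_discard tr s t).2 ⟨ht, by simpa using hn⟩)
  · intro h t ht
    rcases (mem_foldl_discard tr s t).1 ht with ⟨hs, hnp⟩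
    exact hnp (by simpa using h t hs)

-- both required-sets empty together (A tests the raw keys, B their dedup)
theorem ofList_isEmpty (xs : List String) :
    (PySem.Set.ofList xs).isEmpty = xs.isEmpty := by
  cases xs with
  | nil => rfl
  | cons x xs => rw [PySem.Set.ofList_cons]; rfl

theorem all_ofList (xs : List String) (f : String → Bool) :
    (PySem.Set.ofList xs : List String).all f = xs.all f := by
  rw [Bool.eq_iff_iff]
  simp only [List.all_eq_true]
  constructor
  · intro h t ht; exact h t ((PySem.Set.mem_ofList xs t).2 ht)
  · intro h t ht; exact h t ((PySem.Set.mem_ofList xs t).1 ht)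

-- the common core: A's probing loop over a required list equals B's shrinking-set pass from its dedup
theorem core_eq (tr : List (String × Bool)) (l : List String)
    (h : (tr.map Prod.fst).Nodup) :
    pvLoopA tr l =
      (tr.foldl (fun acc p => if p.2 then PySem.Set.discard acc p.1 else acc)
        (PySem.Set.ofList l) : List String).isEmpty := by
  rw [pvLoopA_eq_all, foldl_discard_isEmpty, all_ofList, Bool.eq_iff_iff]
  simp only [List.all_eq_true, decide_eq_true_iff]
  constructor
  · intro hall t ht; exact (getD_iff_mem_passing tr t h).1 (hall t ht)
  · intro hall t ht; exact (getD_iff_mem_passing tr t h).2 (hall t ht)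

-- ===== VERDICT (by name: the statement is the Claim_ definition above) =====
theorem resolve_rate_spec : Claim_equal_resolve_rate := by
  intro tr req _hdom hpre
  unfold Spec_resolve_rate resolve_rate resolve_rate_alt
  cases req with
  | none =>
      show (if (PySem.Set.ofList ((PySem.Dict.mk tr).keys) : List String).isEmpty then false
              else pvLoopA tr (PySem.Set.ofList ((PySem.Dict.mk tr).keys))) =
          (if (PySem.Set.ofList (tr.map Prod.fst) : List String).isEmpty then false
           else (tr.foldl (fun acc p => if p.2 then PySem.Set.discard acc p.1 else acc)
             (PySem.Set.ofList (tr.map Prod.fst)) : List String).isEmpty)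
      have hkeys : (PySem.Dict.mk tr).keys = tr.map Prod.fst := rfl
      rw [hkeys, core_eq tr _ hpre, PySem.Set.ofList_ofList]
  | some s =>
      show (if s.isEmpty then false else pvLoopA tr s) =
          (if (PySem.Set.ofList s : List String).isEmpty then false
           else (tr.foldl (fun acc p => if p.2 then PySem.Set.discard acc p.1 else acc)
             (PySem.Set.ofList s) : List String).isEmpty)
      rw [core_eq tr s hpre, ofList_isEmpty]
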